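-- pv_equiv track=rewrite | github.com/parthabnave/password_analyzer-API | main.py | repeated_substring_count
-- ===== SOURCE A (Python) =====
-- def repeated_substring_count(password):
--     n = len(password)
--     lps = [0] * n
--     length = 0
--     i = 1
--     while i < n:
--         if password[i] == password[length]:
--             length += 1
--             lps[i] = length
--             i += 1
--         else:
--             if length != 0:
--                 length = lps[length - 1]
--             else:
--                 lps[i] = 0
--                 i += 1
--     return max(lps)
-- ===== SOURCE B (Python) =====
-- def repeated_substring_count(password):
--     n = len(password)
--     best = 0
--     for start in range(1, n):
--         match = 0
--         while start + match < n and password[match] == password[start + match]: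
--             match += 1
--         if match > best:
--             best = match
--     return best
-- ===== Notes on version B (the rewrite author's own statement) =====
-- stated objective: simpler
-- what changed: Replaces the KMP failure-function (lps array) construction with a direct scan that, for each start position >= 1, measures the longest common prefix of the password with its suffix at that position and keeps the maximum.
import Mathlib
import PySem

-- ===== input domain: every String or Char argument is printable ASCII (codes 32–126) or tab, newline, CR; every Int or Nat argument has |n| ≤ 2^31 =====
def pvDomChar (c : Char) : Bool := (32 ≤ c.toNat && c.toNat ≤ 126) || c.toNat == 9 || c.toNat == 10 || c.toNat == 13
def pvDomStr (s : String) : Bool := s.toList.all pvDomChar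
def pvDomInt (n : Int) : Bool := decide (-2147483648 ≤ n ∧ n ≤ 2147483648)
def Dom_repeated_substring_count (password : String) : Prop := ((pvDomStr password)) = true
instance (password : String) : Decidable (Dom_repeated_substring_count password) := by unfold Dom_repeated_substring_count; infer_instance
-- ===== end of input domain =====

-- B replaces the KMP failure-array construction by a direct per-start longest-common-prefix scan (simpler, not faster).

-- ===== PORT A =====
-- A's while-loop, ported with a fuel counter; 2*n+1 steps always suffice (each
-- iteration strictly decreases 2*(n-i)+length), proved in the lemmas below.
-- Loop counters i/length and the lps entries are Python ints that stay ≥ 0, kept as Nat;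
-- password[i] / password[length] are always in range, so List.getD is exact there.
def pvLoopA (s : List Char) (n : Nat) : Nat → Nat → Nat → List Nat → List Nat
  | 0, _, _, lps => lps
  | fuel+1, i, len, lps =>
    if i < n then
      if s.getD i ' ' = s.getD len ' ' then
        pvLoopA s n fuel (i+1) (len+1) (lps.set i (len+1))
      else
        if len ≠ 0 then
          pvLoopA s n fuel i (lps.getD (len-1) 0) lps
        else
          pvLoopA s n fuel (i+1) len (lps.set i 0)
    else lps

def repeated_substring_count (password : String) : Int :=
  let s := password.toList
  let n := s.length
  let lps := pvLoopA s n (2*n+1) 1 0 (List.replicate n 0)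
  match lps with
  | [] => 0              -- Python: max([]) raises ValueError here; excluded by Pre_
  | x :: t => ((t.foldl max x : Nat) : Int)   -- max(lps)

-- ===== PORT B =====
-- inner while loop of Source B: count matching chars of password[match:] vs password[start+match:]
def pvMatchLen (s : List Char) (n start m : Nat) : Nat :=
  if _h : start + m < n then
    if s.getD m ' ' = s.getD (start + m) ' ' then pvMatchLen s n start (m+1) else m
  else m
termination_by n - (start + m)
decreasing_by omega

def repeated_substring_count_alt (password : String) : Int :=
  let s := password.toList
  let n := s.length
  (((List.range' 1 (n-1)).foldl (fun best start =>
      let m := pvMatchLen s n start 0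
      if best < m then m else best) 0 : Nat) : Int)

-- ===== PRECONDITION & SPEC =====
-- Pre_ excludes only the empty string, on which A raises ValueError (max() of an empty list).
def Pre_repeated_substring_count (password : String) : Prop := password ≠ ""
instance (password : String) : Decidable (Pre_repeated_substring_count password) := by unfold Pre_repeated_substring_count; infer_instance
def pvWitness_repeated_substring_count : String := "abab"

def Spec_repeated_substring_count (password : String) (out : Int) : Prop := out = repeated_substring_count_alt password
instance (password : String) (out : Int) : Decidable (Spec_repeated_substring_count password out) := by unfold Spec_repeated_substring_count; infer_instance

-- ===== CLAIM (what is proved, stated in full; the proofs are below) =====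
def Claim_equal_repeated_substring_count : Prop := ∀ (password : String), Dom_repeated_substring_count password → Pre_repeated_substring_count password → Spec_repeated_substring_count password (repeated_substring_count password)

-- ===== LEMMAS AND PROOFS =====

-- `pvFail s m` = length of the longest proper border of `s.take m` (the value lps[m-1] of A).
def pvFail (s : List Char) (m : Nat) : Nat :=
  Nat.findGreatest (fun k => s.take k <:+ s.take m) (m-1)

-- (u ++ [a]) is a suffix of (v ++ [b]) iff a = b and u is a suffix of v.
theorem pv_snoc_suffix_snoc {u v : List Char} {a b : Char} :
    (u ++ [a]) <:+ (v ++ [b]) ↔ a = b ∧ u <:+ v := by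
  rw [← List.reverse_prefix]
  simp only [List.reverse_append, List.reverse_cons, List.reverse_nil, List.nil_append,
    List.singleton_append]
  rw [List.cons_prefix_cons, List.reverse_prefix]

-- two suffixes of the same list, shorter is a suffix of the longer
theorem pv_suffix_of_suffix_le {l₁ l₂ l₃ : List Char}
    (h1 : l₁ <:+ l₃) (h2 : l₂ <:+ l₃) (h : l₁.length ≤ l₂.length) : l₁ <:+ l₂ := by
  rw [← List.reverse_prefix] at h1 h2 ⊢
  exact List.prefix_of_prefix_length_le h1 h2 (by simpa using h)

theorem pv_take_succ (s : List Char) (k : Nat) (h : k < s.length) :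
    s.take (k+1) = s.take k ++ [s[k]] := by
  rw [List.take_add_one, List.getElem?_eq_getElem h]
  rfl

-- border extension (K2)
theorem pv_border_succ_iff (s : List Char) (k m : Nat) (hk : k < s.length) (hm : m < s.length) :
    (s.take (k+1) <:+ s.take (m+1)) ↔ (s.take k <:+ s.take m ∧ s[k] = s[m]) := by
  rw [pv_take_succ s k hk, pv_take_succ s m hm, pv_snoc_suffix_snoc]
  tauto

-- (K3) any border length is ≤ pvFail
theorem pv_le_fail (s : List Char) (k m : Nat) (hkm : k < m) (hs : s.take k <:+ s.take m) :
    k ≤ pvFail s m := by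
  exact Nat.le_findGreatest (by omega) hs

-- (K4) pvFail is itself a border
theorem pv_fail_spec (s : List Char) (m : Nat) (hm : 1 ≤ m) :
    pvFail s m < m ∧ s.take (pvFail s m) <:+ s.take m := by
  constructor
  · have := Nat.findGreatest_le (P := fun k => s.take k <:+ s.take m) (m-1)
    unfold pvFail
    omega
  · exact Nat.findGreatest_spec (P := fun k => s.take k <:+ s.take m) (m := 0) (n := m-1)
      (Nat.zero_le _) (by simp)

theorem pv_fail_one (s : List Char) : pvFail s 1 = 0 := by
  simp [pvFail]

-- (K6) the failure function grows by at most one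
theorem pv_fail_succ_le (s : List Char) (m : Nat) (h1 : 1 ≤ m) (h2 : m < s.length) :
    pvFail s (m+1) ≤ pvFail s m + 1 := by
  rcases pv_fail_spec s (m+1) (by omega) with ⟨hlt, hsuf⟩
  cases hk : pvFail s (m+1) with
  | zero => omega
  | succ k' =>
    rw [hk] at hlt hsuf
    have hk'n : k' < s.length := by omega
    have hb := (pv_border_succ_iff s k' m hk'n h2).mp hsuf
    have := pv_le_fail s k' m (by omega) hb.1
    omega

-- main invariant proof for A's loop
theorem pv_loopA_correct (s : List Char) (n : Nat) (hn : n = s.length) :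
    ∀ fuel i len lps,
      1 ≤ i → i ≤ n → len < i →
      s.take len <:+ s.take i →
      (i < n → pvFail s (i+1) ≤ len + 1) →
      lps.length = n →
      (∀ j, j < i → lps.getD j 0 = pvFail s (j+1)) →
      2*(n-i) + len < fuel →
      pvLoopA s n fuel i len lps = (List.range n).map (fun j => pvFail s (j+1)) := by
  intro fuel
  induction fuel with
  | zero => intro i len lps _ _ _ _ _ _ _ hfuel; omega
  | succ fuel ih =>
    intro i len lps hi1 hin hlen hsuf hfail hlplen hlps hfuel
    rw [pvLoopA]
    by_cases hiltn : i < n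
    · rw [if_pos hiltn]
      have hiN : i < s.length := by omega
      have hlenN : len < s.length := by omega
      by_cases heq : s.getD i ' ' = s.getD len ' '
      · rw [if_pos heq]
        rw [List.getD_eq_getElem s ' ' hiN, List.getD_eq_getElem s ' ' hlenN] at heq
        have hb : s.take (len+1) <:+ s.take (i+1) :=
          (pv_border_succ_iff s len i hlenN hiN).mpr ⟨hsuf, heq.symm⟩
        have hf1 : pvFail s (i+1) = len + 1 :=
          le_antisymm (hfail hiltn) (pv_le_fail s (len+1) (i+1) (by omega) hb)
        apply ih (i+1) (len+1) (lps.set i (len+1)) (by omega) (by omega) (by omega) hb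
          ?_ (by simp [hlplen]) ?_ (by omega)
        · intro hi1n
          have := pv_fail_succ_le s (i+1) (by omega) (by omega)
          omega
        · intro j hj
          by_cases hji : j = i
          · subst hji
            rw [List.getD_eq_getElem _ _ (by simp only [List.length_set]; omega),
              List.getElem_set_self, hf1]
          · have hj' : j < i := by omega
            rw [List.getD_eq_getElem _ _ (by simp only [List.length_set]; omega),
              List.getElem_set_ne (by omega), ← List.getD_eq_getElem lps 0 (by omega)]
            exact hlps j hj'
      · rw [if_neg heq]
        rw [List.getD_eq_getElem s ' ' hiN, List.getD_eq_getElem s ' ' hlenN] at heq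
        by_cases hlz : len ≠ 0
        · rw [if_pos hlz]
          have hlen1 : 1 ≤ len := by omega
          have hgl : lps.getD (len-1) 0 = pvFail s len := by
            have h := hlps (len-1) (by omega)
            rwa [Nat.sub_add_cancel hlen1] at h
          rcases pv_fail_spec s len hlen1 with ⟨hfl, hfsuf⟩
          have hnewfail : i < n → pvFail s (i+1) ≤ pvFail s len + 1 := by
            intro _
            rcases pv_fail_spec s (i+1) (by omega) with ⟨hklt, hksuf⟩
            cases hkk : pvFail s (i+1) with
            | zero => omega
            | succ k' =>
              rw [hkk] at hklt hksuf
              have hfb := hfail hiltn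
              rw [hkk] at hfb
              have hk'N : k' < s.length := by omega
              rcases (pv_border_succ_iff s k' i hk'N hiN).mp hksuf with ⟨hbsuf, hbeq⟩
              have hk'len : k' ≠ len := fun e => heq (by subst e; exact hbeq.symm)
              have hk'lt : k' < len := by omega
              have h1 : s.take k' <:+ s.take len :=
                pv_suffix_of_suffix_le hbsuf hsuf
                  (by simp only [List.length_take]; omega)
              have := pv_le_fail s k' len hk'lt h1
              omega
          rw [hgl]
          exact ih i (pvFail s len) lps hi1 hin (by omega) (hfsuf.trans hsuf) hnewfail
            hlplen hlps (by omega)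
        · rw [if_neg hlz]
          have hlz' : len = 0 := by omega
          subst hlz'
          have hf0 : pvFail s (i+1) = 0 := by
            rcases pv_fail_spec s (i+1) (by omega) with ⟨hklt, hksuf⟩
            cases hkk : pvFail s (i+1) with
            | zero => rfl
            | succ k' =>
              have hfb := hfail hiltn
              rw [hkk] at hfb hksuf
              have hk0 : k' = 0 := by omega
              subst hk0
              rcases (pv_border_succ_iff s 0 i (by omega) hiN).mp hksuf with ⟨_, hbeq⟩
              exact absurd hbeq.symm heq
          apply ih (i+1) 0 (lps.set i 0) (by omega) (by omega) (by omega) (by simp)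
            ?_ (by simp [hlplen]) ?_ (by omega)
          · intro hi1n
            have := pv_fail_succ_le s (i+1) (by omega) (by omega)
            omega
          · intro j hj
            by_cases hji : j = i
            · subst hji
              rw [List.getD_eq_getElem _ _ (by simp only [List.length_set]; omega),
                List.getElem_set_self, hf0]
            · have hj' : j < i := by omega
              rw [List.getD_eq_getElem _ _ (by simp only [List.length_set]; omega),
                List.getElem_set_ne (by omega), ← List.getD_eq_getElem lps 0 (by omega)]
              exact hlps j hj'
    · rw [if_neg hiltn]
      have hieq : i = n := by omega
      subst hieq
      apply List.ext_getElem (by simp [hlplen])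
      intro j h1 h2
      simp only [List.getElem_map, List.getElem_range]
      rw [← List.getD_eq_getElem lps 0 h1]
      exact hlps j (by omega)

-- longest common prefix, the specification of B's inner loop
def pvLcp : List Char → List Char → Nat
  | [], _ => 0
  | _ :: _, [] => 0
  | a :: u, b :: v => if a = b then pvLcp u v + 1 else 0

theorem pvLcp_nil_right (u : List Char) : pvLcp u [] = 0 := by
  cases u <;> rfl

theorem pvLcp_le_right (u v : List Char) : pvLcp u v ≤ v.length := by
  induction u generalizing v with
  | nil => simp [pvLcp]
  | cons a u ih =>
    cases v with
    | nil => simp [pvLcp]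
    | cons b v =>
      simp only [pvLcp, List.length_cons]
      split
      · have := ih v; omega
      · omega

theorem pv_take_pvLcp (u v : List Char) : u.take (pvLcp u v) = v.take (pvLcp u v) := by
  induction u generalizing v with
  | nil => simp [pvLcp]
  | cons a u ih =>
    cases v with
    | nil => simp [pvLcp]
    | cons b v =>
      simp only [pvLcp]
      split
      · rename_i hab
        simp only [List.take_succ_cons, hab, ih v]
      · simp

theorem pv_le_pvLcp (u v : List Char) (k : Nat) (hk : k ≤ u.length)
    (h : u.take k = v.take k) : k ≤ pvLcp u v := by
  induction k generalizing u v with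
  | zero => omega
  | succ k ih =>
    cases u with
    | nil => simp at hk
    | cons a u =>
      cases v with
      | nil => simp at h
      | cons b v =>
        simp only [List.take_succ_cons, List.cons.injEq] at h
        obtain ⟨hab, htk⟩ := h
        have := ih u v (by simpa using hk) htk
        simp only [pvLcp, if_pos hab]
        omega

theorem pv_matchLen_eq (s : List Char) (n : Nat) (hn : n = s.length) :
    ∀ start m, pvMatchLen s n start m = m + pvLcp (s.drop m) (s.drop (start + m)) := by
  intro start m
  induction hd : n - (start + m) generalizing m with
  | zero =>
    have hge : ¬ start + m < n := by omega
    rw [pvMatchLen, dif_neg hge]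
    rw [show s.drop (start + m) = [] from List.drop_eq_nil_of_le (by omega), pvLcp_nil_right]
    omega
  | succ d ih =>
    have hlt : start + m < n := by omega
    have hmN : m < s.length := by omega
    have hsmN : start + m < s.length := by omega
    rw [pvMatchLen, dif_pos hlt, List.getD_eq_getElem s ' ' hmN, List.getD_eq_getElem s ' ' hsmN]
    rw [List.drop_eq_getElem_cons hmN, List.drop_eq_getElem_cons hsmN]
    by_cases heq : s[m] = s[start + m]
    · rw [if_pos heq, ih (m+1) (by omega)]
      have h1 : start + (m + 1) = start + m + 1 := by omega
      rw [h1]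
      simp only [pvLcp, if_pos heq]
      omega
    · rw [if_neg heq]
      simp only [pvLcp, if_neg heq]
      omega

-- occurrence at position j of the length-k prefix ↔ border of s.take (j+k)
theorem pv_occ_iff_border (s : List Char) (j k : Nat) (hj : 1 ≤ j) (hjk : j + k ≤ s.length) :
    (s.take k <:+ s.take (j+k)) ↔ s.take k = (s.drop j).take k := by
  have htake : s.take (j+k) = s.take j ++ (s.drop j).take k := List.take_add
  constructor
  · rintro ⟨w, hw⟩
    rw [htake] at hw
    have hlen : w.length = (s.take j).length := by
      have h1 := congrArg List.length hw
      simp only [List.length_append, List.length_take, List.length_drop] at h1 ⊢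
      omega
    exact List.append_inj_right hw hlen
  · intro h
    exact ⟨s.take j, by rw [htake, ← h]⟩

theorem pv_foldl_max_le_iff (l : List Nat) (a c : Nat) :
    l.foldl max a ≤ c ↔ a ≤ c ∧ ∀ x ∈ l, x ≤ c := by
  induction l generalizing a with
  | nil => simp
  | cons x t ih =>
    simp only [List.foldl_cons, List.mem_cons, ih]
    constructor
    · rintro ⟨h1, h2⟩
      exact ⟨by omega, fun y hy => hy.elim (fun e => by omega) (h2 y)⟩
    · rintro ⟨h1, h2⟩
      exact ⟨by have := h2 x (Or.inl rfl); omega, fun y hy => h2 y (Or.inr hy)⟩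

theorem pv_le_foldl_max (l : List Nat) (a : Nat) :
    a ≤ l.foldl max a ∧ ∀ x ∈ l, x ≤ l.foldl max a := by
  exact (pv_foldl_max_le_iff l a (l.foldl max a)).mp le_rfl

-- the central equality: max of the failure values = max of the per-start lcp values
theorem pv_max_eq (s : List Char) (hs : s ≠ []) :
    ((List.range s.length).map (fun j => pvFail s (j+1))).foldl max 0
      = ((List.range' 1 (s.length - 1)).map (fun st => pvLcp s (s.drop st))).foldl max 0 := by
  have hn1 : 1 ≤ s.length := List.length_pos_of_ne_nil hs
  apply le_antisymm
  · rw [pv_foldl_max_le_iff]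
    refine ⟨Nat.zero_le _, ?_⟩
    intro x hx
    simp only [List.mem_map, List.mem_range] at hx
    obtain ⟨j, hj, rfl⟩ := hx
    cases hk : pvFail s (j+1) with
    | zero => exact Nat.zero_le _
    | succ k' =>
      rcases pv_fail_spec s (j+1) (by omega) with ⟨hlt, hsuf⟩
      rw [hk] at hlt hsuf
      have hsplit : ((j+1) - (k'+1)) + (k'+1) = j+1 := by omega
      have hj01 : 1 ≤ (j+1) - (k'+1) := by omega
      have hjk : ((j+1) - (k'+1)) + (k'+1) ≤ s.length := by omega
      have hocc : s.take (k'+1) = (s.drop ((j+1) - (k'+1))).take (k'+1) :=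
        (pv_occ_iff_border s ((j+1) - (k'+1)) (k'+1) hj01 hjk).mp (by rw [hsplit]; exact hsuf)
      have hle : k'+1 ≤ pvLcp s (s.drop ((j+1) - (k'+1))) :=
        pv_le_pvLcp _ _ _ (by omega) hocc
      have hmem : pvLcp s (s.drop ((j+1) - (k'+1)))
          ∈ (List.range' 1 (s.length - 1)).map (fun st => pvLcp s (s.drop st)) := by
        simp only [List.mem_map]
        exact ⟨(j+1) - (k'+1), List.mem_range'_1.mpr ⟨hj01, by omega⟩, rfl⟩
      have := (pv_le_foldl_max _ 0).2 _ hmem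
      omega
  · rw [pv_foldl_max_le_iff]
    refine ⟨Nat.zero_le _, ?_⟩
    intro x hx
    simp only [List.mem_map] at hx
    obtain ⟨j, hjmem, rfl⟩ := hx
    rw [List.mem_range'_1] at hjmem
    cases hk : pvLcp s (s.drop j) with
    | zero => exact Nat.zero_le _
    | succ k' =>
      have hkle : k'+1 ≤ (s.drop j).length := hk ▸ pvLcp_le_right s (s.drop j)
      have hjk : j + (k'+1) ≤ s.length := by
        simp only [List.length_drop] at hkle; omega
      have hocc : s.take (k'+1) = (s.drop j).take (k'+1) := by
        rw [← hk]; exact pv_take_pvLcp s (s.drop j)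
      have hb : s.take (k'+1) <:+ s.take (j + (k'+1)) :=
        (pv_occ_iff_border s j (k'+1) (by omega) hjk).mpr hocc
      have hf : k'+1 ≤ pvFail s (j + (k'+1)) :=
        pv_le_fail s (k'+1) (j+(k'+1)) (by omega) hb
      have hmem : pvFail s (j+(k'+1)) ∈ (List.range s.length).map (fun j => pvFail s (j+1)) := by
        simp only [List.mem_map, List.mem_range]
        exact ⟨j + k', by omega, by rw [show j + k' + 1 = j + (k'+1) by omega]⟩
      have := (pv_le_foldl_max _ 0).2 _ hmem
      omega

-- ===== VERDICT (by name: the statement is the Claim_ definition above) =====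
theorem repeated_substring_count_spec : Claim_equal_repeated_substring_count := by
  intro p _ hpre
  unfold Spec_repeated_substring_count repeated_substring_count repeated_substring_count_alt
  have hs : p.toList ≠ [] := by
    intro h
    exact hpre (String.toList_inj.mp (by simpa using h))
  have hn1 : 1 ≤ p.toList.length := List.length_pos_of_ne_nil hs
  have hloop : pvLoopA p.toList p.toList.length (2*p.toList.length+1) 1 0
      (List.replicate p.toList.length 0)
      = (List.range p.toList.length).map (fun j => pvFail p.toList (j+1)) := by
    apply pv_loopA_correct p.toList p.toList.length rfl (2*p.toList.length+1) 1 0 _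
      le_rfl hn1 (by omega) (by simp)
    · intro h1n
      have := pv_fail_succ_le p.toList 1 le_rfl (by omega)
      have := pv_fail_one p.toList
      omega
    · simp
    · intro j hj
      have hj0 : j = 0 := by omega
      subst hj0
      rw [List.getD_replicate _ (by omega), pv_fail_one]
    · omega
  have hmapne : (List.range p.toList.length).map (fun j => pvFail p.toList (j+1)) ≠ [] := by
    simp only [ne_eq, List.map_eq_nil_iff, List.range_eq_nil]
    omega
  obtain ⟨x, t, hxt⟩ := List.exists_cons_of_ne_nil hmapne
  show (match pvLoopA p.toList p.toList.length (2 * p.toList.length + 1) 1 0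
          (List.replicate p.toList.length 0) with
        | [] => (0:Int)
        | x :: t => ((t.foldl max x : Nat) : Int))
      = (((List.range' 1 (p.toList.length - 1)).foldl (fun best start =>
            let m := pvMatchLen p.toList p.toList.length start 0
            if best < m then m else best) 0 : Nat) : Int)
  rw [hloop, hxt]
  simp only []
  have hfold : t.foldl max x
      = ((List.range p.toList.length).map (fun j => pvFail p.toList (j+1))).foldl max 0 := by
    rw [hxt, List.foldl_cons, Nat.zero_max]
  have hB : (List.range' 1 (p.toList.length-1)).foldl (fun best start =>
        let m := pvMatchLen p.toList p.toList.length start 0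
        if best < m then m else best) 0
      = ((List.range' 1 (p.toList.length-1)).map (fun st => pvLcp p.toList (p.toList.drop st))).foldl max 0 := by
    rw [List.foldl_map]
    have hfun : (fun (best st : Nat) =>
          let m := pvMatchLen p.toList p.toList.length st 0
          if best < m then m else best)
        = (fun (best st : Nat) => max best (pvLcp p.toList (p.toList.drop st))) := by
      funext b st
      simp only [pv_matchLen_eq p.toList p.toList.length rfl st 0, Nat.zero_add,
        List.drop_zero, Nat.add_zero]
      split <;> omega
    rw [hfun]
  rw [hfold, pv_max_eq p.toList hs, ← hB]
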